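-- pv_equiv track=rewrite | github.com/cloudalien2025/brains | Brains_Ingestion_App/adapters/transcription.py | _pick_best_track
-- ===== SOURCE A (Python) =====
-- def _pick_best_track(tracks: list[dict]) -> dict | None:
--     if not tracks:
--         return None
--
--     english_codes = {"en", "en-us", "en-gb"}
--
--     def _is_english(track: dict) -> bool:
--         return (track.get("lang_code") or "").lower() in english_codes
--
--     manual_english = [t for t in tracks if _is_english(t) and t.get("kind") != "asr"]
--     if manual_english:
--         return manual_english[0]
--
--     auto_english = [t for t in tracks if _is_english(t) and t.get("kind") == "asr"]
--     if auto_english: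
--         return auto_english[0]
--
--     any_manual = [t for t in tracks if t.get("kind") != "asr"]
--     if any_manual:
--         return any_manual[0]
--
--     any_auto = [t for t in tracks if t.get("kind") == "asr"]
--     return any_auto[0] if any_auto else None
-- ===== SOURCE B (Python) =====
-- def _pick_best_track(tracks: list[dict]) -> dict | None:
--     if not tracks:
--         return None
--
--     english_codes = {"en", "en-us", "en-gb"}
--
--     def _is_english(track: dict) -> bool:
--         return (track.get("lang_code") or "").lower() in english_codes
--
--     def _priority(track: dict) -> int:
--         asr = track.get("kind") == "asr"
--         return (0 if _is_english(track) else 2) + (1 if asr else 0)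
--
--     return min(tracks, key=_priority)
-- ===== Notes on version B (the rewrite author's own statement) =====
-- stated objective: simpler
-- what changed: Replaces A's four separate filter passes and branch chain with a single priority key (english/manual rank 0-3) and one min(tracks, key=...) pass, relying on min's first-minimum tie-breaking to preserve A's original-order choice.
import Mathlib
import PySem

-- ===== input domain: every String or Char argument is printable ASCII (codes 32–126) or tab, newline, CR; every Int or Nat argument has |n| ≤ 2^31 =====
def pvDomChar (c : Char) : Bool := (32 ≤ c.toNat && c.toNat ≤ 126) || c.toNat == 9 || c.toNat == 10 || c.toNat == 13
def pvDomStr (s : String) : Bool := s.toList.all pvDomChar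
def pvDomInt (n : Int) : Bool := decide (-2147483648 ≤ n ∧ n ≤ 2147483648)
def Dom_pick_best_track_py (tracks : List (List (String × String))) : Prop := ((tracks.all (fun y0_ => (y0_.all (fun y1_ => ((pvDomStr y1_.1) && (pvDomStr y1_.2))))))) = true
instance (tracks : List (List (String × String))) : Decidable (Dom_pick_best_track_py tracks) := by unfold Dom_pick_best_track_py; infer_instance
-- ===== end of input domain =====

-- B replaces A's four filter passes and branch chain by one min(tracks, key=priority) pass (same cost, simpler decomposition).


-- ===== PORT A =====
-- _is_english: (track.get("lang_code") or "").lower() in {"en","en-us","en-gb"}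
-- (`x or ""` on a str is "" exactly when the key is missing or the value is "", both giving "" here)
def is_english_py (track : List (String × String)) : Bool :=
  ["en", "en-us", "en-gb"].contains (PySem.Str.lower (((PySem.Dict.mk track).get? "lang_code").getD ""))

def pick_best_track_py (tracks : List (List (String × String))) : Option (List (String × String)) :=
  if tracks.isEmpty then none
  else
    match tracks.filter (fun t => is_english_py t && !((PySem.Dict.mk t).get? "kind" == some "asr")) with
    | h :: _ => some h
    | [] =>
      match tracks.filter (fun t => is_english_py t && ((PySem.Dict.mk t).get? "kind" == some "asr")) with
      | h :: _ => some h
      | [] =>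
        match tracks.filter (fun t => !((PySem.Dict.mk t).get? "kind" == some "asr")) with
        | h :: _ => some h
        | [] =>
          match tracks.filter (fun t => (PySem.Dict.mk t).get? "kind" == some "asr") with
          | h :: _ => some h
          | [] => none

-- ===== PORT B =====
def priority_py (track : List (String × String)) : Int :=
  let asr := (PySem.Dict.mk track).get? "kind" == some "asr"
  (if is_english_py track then 0 else 2) + (if asr then 1 else 0)

def pick_best_track_py_alt (tracks : List (List (String × String))) : Option (List (String × String)) :=
  if tracks.isEmpty then none
  else PySem.List.min? tracks priority_py

-- ===== PRECONDITION & SPEC =====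
def Spec_pick_best_track_py (tracks : List (List (String × String))) (out : Option (List (String × String))) : Prop := out = pick_best_track_py_alt tracks
instance (tracks : List (List (String × String))) (out : Option (List (String × String))) : Decidable (Spec_pick_best_track_py tracks out) := by unfold Spec_pick_best_track_py; infer_instance

-- ===== CLAIM (what is proved, stated in full; the proofs are below) =====
def Claim_equal_pick_best_track_py : Prop := ∀ (tracks : List (List (String × String))), Dom_pick_best_track_py tracks → Spec_pick_best_track_py tracks (pick_best_track_py tracks)

-- ===== LEMMAS AND PROOFS =====
-- the "keep the first strictly smaller" step that min(…, key=…) performs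
def pvStep (m x : List (String × String)) : List (String × String) :=
  if priority_py x < priority_py m then x else m

theorem pick_single (t : List (String × String)) :
    pick_best_track_py [t] = some t := by
  by_cases h1 : is_english_py t <;>
    by_cases h2 : ((PySem.Dict.mk t).get? "kind" == some "asr") = true <;>
    simp [pick_best_track_py, List.filter, h1, h2]

theorem pick_swap (t x : List (String × String)) (ts : List (List (String × String))) :
    pick_best_track_py (t :: x :: ts) = pick_best_track_py (pvStep t x :: ts) := by
  by_cases h1 : is_english_py t <;>
    by_cases h2 : ((PySem.Dict.mk t).get? "kind" == some "asr") = true <;>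
    by_cases h3 : is_english_py x <;>
    by_cases h4 : ((PySem.Dict.mk x).get? "kind" == some "asr") = true <;>
    simp [pick_best_track_py, pvStep, priority_py, List.filter, h1, h2, h3, h4]

theorem pick_cons (ts : List (List (String × String))) :
    ∀ t, pick_best_track_py (t :: ts) = some (ts.foldl pvStep t) := by
  induction ts with
  | nil => intro t; simpa using pick_single t
  | cons x ts ih =>
    intro t
    rw [pick_swap, List.foldl_cons, ih]

theorem min?_cons (ts : List (List (String × String))) :
    ∀ t, PySem.List.min? (t :: ts) priority_py = some (ts.foldl pvStep t) := by
  have core : ∀ (ts : List (List (String × String))) (t : List (String × String)),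
      List.foldl
        (fun acc x =>
          match acc with
          | none => some x
          | some m => if priority_py x < priority_py m then some x else some m)
        (some t) ts = some (ts.foldl pvStep t) := by
    intro ts
    induction ts with
    | nil => intro t; rfl
    | cons x ts ih =>
      intro t
      rw [List.foldl_cons, List.foldl_cons]
      have : (if priority_py x < priority_py t then some x else some t) = some (pvStep t x) := by
        unfold pvStep; split <;> rfl
      simp only [this]
      exact ih (pvStep t x)
  intro t
  simp only [PySem.List.min?, List.foldl_cons]
  convert core ts t using 2
  funext acc x
  cases acc with
  | none => rfl
  | some m => by_cases h : priority_py x < priority_py m <;> simp [h]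

-- ===== VERDICT (by name: the statement is the Claim_ definition above) =====
theorem pick_best_track_py_spec : Claim_equal_pick_best_track_py := by
  intro tracks _
  unfold Spec_pick_best_track_py
  cases tracks with
  | nil => rfl
  | cons t ts =>
    rw [pick_cons, pick_best_track_py_alt]
    simp [min?_cons]
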